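-- pv_equiv track=rewrite | github.com/Neglectorr/ExtendedUI | DB/verify_findings.py | lua_pattern_to_regex
-- ===== SOURCE A (Python) =====
-- def lua_pattern_to_regex(lua_pat):
--     """Convert a Lua string pattern to a Python regex (best-effort)."""
--     # Common Lua pattern classes
--     replacements = [
--         (r'%w', r'\w'),
--         (r'%d', r'\d'),
--         (r'%a', r'[a-zA-Z]'),
--         (r'%l', r'[a-z]'),
--         (r'%u', r'[A-Z]'),
--         (r'%s', r'\s'),
--         (r'%p', r'[^\w\s]'),
--     ]
--     result = lua_pat
--     for lua, py in replacements:
--         result = result.replace(lua, py)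
--     return result
-- ===== SOURCE B (Python) =====
-- def lua_pattern_to_regex(lua_pat):
--     """Convert a Lua string pattern to a Python regex (best-effort)."""
--     mapping = {
--         'w': r'\w',
--         'd': r'\d',
--         'a': r'[a-zA-Z]',
--         'l': r'[a-z]',
--         'u': r'[A-Z]',
--         's': r'\s',
--         'p': r'[^\w\s]',
--     }
--     out = []
--     i = 0
--     n = len(lua_pat)
--     while i < n:
--         c = lua_pat[i]
--         if c == '%' and i + 1 < n and lua_pat[i + 1] in mapping:
--             out.append(mapping[lua_pat[i + 1]])
--             i += 2
--         else:
--             out.append(c)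
--             i += 1
--     return ''.join(out)
-- ===== Notes on version B (the rewrite author's own statement) =====
-- stated objective: alternative
-- what changed: Replaces A's seven sequential full-string replace passes by a single left-to-right scan that looks each percent-class token up in a dict built once; equivalence holds because no replacement text contains a percent sign.
import Mathlib
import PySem

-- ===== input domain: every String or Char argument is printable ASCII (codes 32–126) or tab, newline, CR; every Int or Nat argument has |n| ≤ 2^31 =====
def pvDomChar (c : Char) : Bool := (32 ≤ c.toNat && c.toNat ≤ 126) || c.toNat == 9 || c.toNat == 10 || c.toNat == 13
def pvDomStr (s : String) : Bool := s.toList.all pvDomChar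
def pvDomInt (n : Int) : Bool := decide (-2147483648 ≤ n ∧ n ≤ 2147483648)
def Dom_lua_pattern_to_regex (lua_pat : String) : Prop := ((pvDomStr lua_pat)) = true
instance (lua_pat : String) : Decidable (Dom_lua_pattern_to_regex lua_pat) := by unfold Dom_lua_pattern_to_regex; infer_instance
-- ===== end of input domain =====

-- B replaces A's seven sequential full-string replace passes by one left-to-right scan
-- with a table lookup per '%x' token (objective: alternative single-pass algorithm).


-- ===== PORT A =====
def lua_pattern_to_regex (lua_pat : String) : String :=
  let replacements : List (String × String) :=
    [("%w", "\\w"), ("%d", "\\d"), ("%a", "[a-zA-Z]"), ("%l", "[a-z]"),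
     ("%u", "[A-Z]"), ("%s", "\\s"), ("%p", "[^\\w\\s]")]
  replacements.foldl (fun result p => PySem.Str.replace result p.1 p.2) lua_pat

-- ===== PORT B =====
def pvLuaMap : PySem.Dict Char String := PySem.Dict.mk
  [('w', "\\w"), ('d', "\\d"), ('a', "[a-zA-Z]"), ('l', "[a-z]"),
   ('u', "[A-Z]"), ('s', "\\s"), ('p', "[^\\w\\s]")]

def pvBScan (s : List Char) : List Char :=
  match s with
  | [] => []
  | c :: rest =>
    if c = '%' then
      match rest with
      | c2 :: rest2 =>
        match pvLuaMap.get? c2 with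
        | some r => r.toList ++ pvBScan rest2
        | none => c :: pvBScan (c2 :: rest2)
      | [] => [c]
    else c :: pvBScan rest
termination_by s.length
decreasing_by all_goals simp

def lua_pattern_to_regex_alt (lua_pat : String) : String :=
  String.ofList (pvBScan lua_pat.toList)

-- ===== PRECONDITION & SPEC =====
def Spec_lua_pattern_to_regex (lua_pat : String) (out : String) : Prop := out = lua_pattern_to_regex_alt lua_pat
instance (lua_pat : String) (out : String) : Decidable (Spec_lua_pattern_to_regex lua_pat out) := by unfold Spec_lua_pattern_to_regex; infer_instance

-- ===== CLAIM (what is proved, stated in full; the proofs are below) =====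
def Claim_equal_lua_pattern_to_regex : Prop := ∀ (lua_pat : String), Dom_lua_pattern_to_regex lua_pat → Spec_lua_pattern_to_regex lua_pat (lua_pattern_to_regex lua_pat)

-- ===== LEMMAS AND PROOFS =====

-- generic single-token scan: replaces every occurrence of "%x" by `new`, left to right
def pvScanOne (x : Char) (new : List Char) (s : List Char) : List Char :=
  match s with
  | [] => []
  | c :: rest =>
    if c = '%' then
      match rest with
      | c2 :: rest2 =>
        if c2 = x then new ++ pvScanOne x new rest2 else c :: pvScanOne x new (c2 :: rest2)
      | [] => [c]
    else c :: pvScanOne x new rest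
termination_by s.length
decreasing_by all_goals simp

-- generic table scan, parametrised by the lookup function
def pvScanT (f : Char → Option (List Char)) (s : List Char) : List Char :=
  match s with
  | [] => []
  | c :: rest =>
    if c = '%' then
      match rest with
      | c2 :: rest2 =>
        match f c2 with
        | some r => r ++ pvScanT f rest2
        | none => c :: pvScanT f (c2 :: rest2)
      | [] => [c]
    else c :: pvScanT f rest
termination_by s.length
decreasing_by all_goals simp

-- lookup function of an association list
def pvF (ts : List (Char × List Char)) : Char → Option (List Char) :=
  fun c => (ts.find? (fun p => p.1 == c)).map (·.2)


lemma pvScanOne_nil (x : Char) (new : List Char) : pvScanOne x new [] = [] := by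
  rw [pvScanOne.eq_def]

lemma pvScanOne_singleton (x : Char) (new : List Char) (c : Char) : pvScanOne x new [c] = [c] := by
  rw [pvScanOne.eq_def]; by_cases hc : c = '%' <;> simp [hc, pvScanOne_nil]

lemma pvScanT_nil (f : Char → Option (List Char)) : pvScanT f [] = [] := by
  rw [pvScanT.eq_def]

lemma pvBScan_nil : pvBScan [] = [] := by
  rw [pvBScan.eq_def]

lemma pvBScan_singleton (c : Char) : pvBScan [c] = [c] := by
  rw [pvBScan.eq_def]; by_cases hc : c = '%' <;> simp [hc, pvBScan_nil]

lemma pvScanOne_cons_ne (x : Char) (new : List Char) {c : Char} (h : c ≠ '%') (M : List Char) :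
    pvScanOne x new (c :: M) = c :: pvScanOne x new M := by
  rw [pvScanOne.eq_def]; simp [h]

lemma pvScanOne_pct (x : Char) (new M : List Char) (h : M.head? ≠ some x) :
    pvScanOne x new ('%' :: M) = '%' :: pvScanOne x new M := by
  cases M with
  | nil => rw [pvScanOne_singleton, pvScanOne_nil]
  | cons m M' =>
    have hm : m ≠ x := by simpa using h
    rw [pvScanOne.eq_def]; simp [hm]

lemma pvScanOne_pct_match (x : Char) (new M : List Char) :
    pvScanOne x new ('%' :: x :: M) = new ++ pvScanOne x new M := by
  rw [pvScanOne.eq_def]; simp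

lemma pvScanOne_passthrough (x : Char) (new : List Char) :
    ∀ (p M : List Char), '%' ∉ p → pvScanOne x new (p ++ M) = p ++ pvScanOne x new M := by
  intro p
  induction p with
  | nil => intro M _; simp
  | cons c p' ih =>
    intro M hp
    have hc : c ≠ '%' := fun h => hp (h ▸ List.mem_cons_self)
    have hp' : '%' ∉ p' := fun h => hp (List.mem_cons_of_mem _ h)
    rw [List.cons_append, pvScanOne_cons_ne x new hc, ih M hp', List.cons_append]

lemma pvScanT_cons_ne (f : Char → Option (List Char)) {c : Char} (h : c ≠ '%') (M : List Char) :
    pvScanT f (c :: M) = c :: pvScanT f M := by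
  cases M with
  | nil => rw [pvScanT.eq_def]; simp [h, pvScanT_nil]
  | cons m M' => rw [pvScanT.eq_def]; simp [h]

lemma pvScanT_singleton (f : Char → Option (List Char)) (c : Char) :
    pvScanT f [c] = [c] := by
  rw [pvScanT.eq_def]; by_cases hc : c = '%' <;> simp [hc, pvScanT_nil]

lemma pvScanT_pct_some (f : Char → Option (List Char)) {c2 : Char} {r : List Char}
    (h : f c2 = some r) (M : List Char) :
    pvScanT f ('%' :: c2 :: M) = r ++ pvScanT f M := by
  rw [pvScanT.eq_def]; simp [h]

lemma pvScanT_pct_none (f : Char → Option (List Char)) {c2 : Char}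
    (h : f c2 = none) (M : List Char) :
    pvScanT f ('%' :: c2 :: M) = '%' :: pvScanT f (c2 :: M) := by
  rw [pvScanT.eq_def]; simp [h]

lemma pvScanT_pct_head (f : Char → Option (List Char)) (x : Char) (hx : x ≠ '%')
    (hr : ∀ c r, f c = some r → r ≠ [] ∧ r.head? ≠ some x) :
    ∀ M, (pvScanT f ('%' :: M)).head? ≠ some x := by
  intro M
  cases M with
  | nil => rw [pvScanT_singleton]; simp; exact fun h => hx h.symm
  | cons c2 M' =>
    cases hfc : f c2 with
    | some r =>
      rw [pvScanT_pct_some f hfc]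
      obtain ⟨hne, hhd⟩ := hr c2 r hfc
      cases r with
      | nil => exact absurd rfl hne
      | cons a r' => simpa using hhd
    | none =>
      rw [pvScanT_pct_none f hfc]
      simp; exact fun h => hx h.symm

lemma pvScanT_nil_f (s : List Char) : pvScanT (pvF []) s = s := by
  have : ∀ n s, List.length s ≤ n → pvScanT (pvF []) s = s := by
    intro n
    induction n with
    | zero =>
      intro s h
      have : s = [] := List.length_eq_zero_iff.mp (Nat.le_zero.mp h)
      subst this; rw [pvScanT_nil]
    | succ n ih =>
      intro s hs
      match s with
      | [] => rw [pvScanT_nil]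
      | [c] => exact pvScanT_singleton _ c
      | c :: c2 :: t =>
        by_cases hc : c = '%'
        · subst hc
          rw [pvScanT_pct_none (pvF []) rfl]
          have := ih (c2 :: t) (by simpa using Nat.le_of_succ_le_succ hs)
          rw [this]
        · rw [pvScanT_cons_ne _ hc]
          have := ih (c2 :: t) (by simpa using Nat.le_of_succ_le_succ hs)
          rw [this]
  exact this s.length s le_rfl

-- the fusion lemma: one more sequential pass = one bigger table
lemma pvFuse (f : Char → Option (List Char)) (x : Char) (new : List Char)
    (hx : x ≠ '%') (hfx : f x = none) (hfp : f '%' = none)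
    (hr : ∀ c r, f c = some r → r ≠ [] ∧ '%' ∉ r ∧ r.head? ≠ some x) :
    ∀ s, pvScanOne x new (pvScanT f s) =
      pvScanT (fun c => if c = x then some new else f c) s := by
  have main : ∀ n s, List.length s ≤ n → pvScanOne x new (pvScanT f s) =
      pvScanT (fun c => if c = x then some new else f c) s := by
    intro n
    induction n with
    | zero =>
      intro s hs
      have : s = [] := List.length_eq_zero_iff.mp (Nat.le_zero.mp hs)
      subst this; rw [pvScanT_nil, pvScanT_nil, pvScanOne_nil]
    | succ n ih =>
      intro s hs
      match s with
      | [] => rw [pvScanT_nil, pvScanT_nil, pvScanOne_nil]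
      | [c] =>
        rw [pvScanT_singleton, pvScanT_singleton, pvScanOne_singleton]
      | c :: c2 :: t =>
        have ht : List.length t ≤ n := by simp at hs; omega
        have ht2 : List.length (c2 :: t) ≤ n := by simp at hs ⊢; omega
        by_cases hc : c = '%'
        · subst hc
          cases hfc : f c2 with
          | some r =>
            obtain ⟨hne, hnp, hhd⟩ := hr c2 r hfc
            have hc2x : c2 ≠ x := fun h => by rw [h, hfx] at hfc; simp at hfc
            rw [pvScanT_pct_some f hfc, pvScanOne_passthrough x new r _ hnp, ih t ht,
              pvScanT_pct_some _ (show (if c2 = x then some new else f c2) = some r by simp [hc2x, hfc])]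
          | none =>
            by_cases h2 : c2 = x
            · have hc2p : c2 ≠ '%' := by rw [h2]; exact hx
              rw [pvScanT_pct_none f hfc, pvScanT_cons_ne f hc2p, h2, pvScanOne_pct_match,
                ih t ht, pvScanT_pct_some _ (show (if x = x then some new else f x) = some new by simp)]
            · by_cases hp2 : c2 = '%'
              · subst hp2
                rw [pvScanT_pct_none f hfc]
                have hhead := pvScanT_pct_head f x hx
                  (fun c r h => ⟨(hr c r h).1, (hr c r h).2.2⟩) t
                rw [pvScanOne_pct x new _ hhead, ih ('%' :: t) ht2,
                  pvScanT_pct_none _ (show (if '%' = x then some new else f '%') = none by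
                    have hpx : ¬ ('%' = x) := fun h => hx h.symm
                    simp [hpx, hfp])]
              · rw [pvScanT_pct_none f hfc, pvScanT_cons_ne f hp2,
                  pvScanOne_pct x new _ (by simpa using h2), ← pvScanT_cons_ne f hp2,
                  ih (c2 :: t) ht2,
                  pvScanT_pct_none _ (show (if c2 = x then some new else f c2) = none by simp [h2, hfc])]
        · rw [pvScanT_cons_ne f hc, pvScanOne_cons_ne x new hc, ih (c2 :: t) ht2,
            pvScanT_cons_ne _ hc]
  intro s; exact main s.length s le_rfl

lemma pvF_some_mem {ts : List (Char × List Char)} {c : Char} {r : List Char}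
    (h : pvF ts c = some r) : r ∈ ts.map (·.2) := by
  simp only [pvF, Option.map_eq_some_iff] at h
  obtain ⟨p, hp, rfl⟩ := h
  exact List.mem_map_of_mem (List.mem_of_find?_eq_some hp)

lemma pvF_cons (x : Char) (new : List Char) (ts : List (Char × List Char)) (c : Char) :
    pvF ((x, new) :: ts) c = if c = x then some new else pvF ts c := by
  by_cases hc : c = x
  · subst hc; simp [pvF, List.find?]
  · have hxc : (x == c) = false := beq_eq_false_iff_ne.mpr (Ne.symm hc)
    simp [pvF, List.find?, hxc, hc]

lemma pvScanT_congr (g₁ g₂ : Char → Option (List Char)) (hg : ∀ c, g₁ c = g₂ c) :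
    ∀ u, pvScanT g₁ u = pvScanT g₂ u := by
  have : ∀ n u, List.length u ≤ n → pvScanT g₁ u = pvScanT g₂ u := by
    intro n
    induction n with
    | zero =>
      intro u hu; have : u = [] := List.length_eq_zero_iff.mp (Nat.le_zero.mp hu)
      subst this; rw [pvScanT_nil, pvScanT_nil]
    | succ n ih =>
      intro u hu
      match u with
      | [] => rw [pvScanT_nil, pvScanT_nil]
      | [c] => rw [pvScanT_singleton, pvScanT_singleton]
      | c :: c2 :: t =>
        have ht : List.length t ≤ n := by simp at hu; omega
        have ht2 : List.length (c2 :: t) ≤ n := by simp at hu ⊢; omega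
        by_cases hc : c = '%'
        · subst hc
          cases hfc : g₁ c2 with
          | some r => rw [pvScanT_pct_some g₁ hfc, pvScanT_pct_some g₂ (by rw [← hg c2]; exact hfc), ih t ht]
          | none => rw [pvScanT_pct_none g₁ hfc, pvScanT_pct_none g₂ (by rw [← hg c2]; exact hfc), ih (c2 :: t) ht2]
        · rw [pvScanT_cons_ne g₁ hc, pvScanT_cons_ne g₂ hc, ih (c2 :: t) ht2]
  exact fun u => this u.length u le_rfl

lemma pvFuseF (ts : List (Char × List Char)) (x : Char) (new : List Char)
    (hx : x ≠ '%') (hfx : pvF ts x = none) (hfp : pvF ts '%' = none)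
    (hr : ∀ r ∈ ts.map (·.2), r ≠ [] ∧ '%' ∉ r ∧ r.head? ≠ some x) (s : List Char) :
    pvScanOne x new (pvScanT (pvF ts) s) = pvScanT (pvF ((x, new) :: ts)) s := by
  rw [pvFuse (pvF ts) x new hx hfx hfp (fun c r h => hr r (pvF_some_mem h)) s]
  exact pvScanT_congr _ _ (fun c => (pvF_cons x new ts c).symm) s

-- the go loop of PySem.Chars.replace, with old = "%x", IS the single-token scan
lemma pvGoEq (x : Char) (new : List Char) :
    ∀ (fuel : Nat) (l acc : List Char), List.length l ≤ fuel →
      PySem.Chars.replace.go ['%', x] new fuel l acc = acc.reverse ++ pvScanOne x new l := by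
  intro fuel
  induction fuel with
  | zero =>
    intro l acc h
    have : l = [] := List.length_eq_zero_iff.mp (Nat.le_zero.mp h)
    subst this
    rw [pvScanOne_nil]
    simp [PySem.Chars.replace.go]
  | succ fuel ih =>
    intro l acc h
    match l with
    | [] => rw [pvScanOne_nil]; simp [PySem.Chars.replace.go]
    | [c] =>
      have hpre : ['%', x].isPrefixOf [c] = false := by simp [List.isPrefixOf]
      rw [PySem.Chars.replace.go]
      simp only [hpre, Bool.false_eq_true, if_false]
      rw [ih [] (c :: acc) (by simp), pvScanOne_singleton, pvScanOne_nil]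
      simp
    | c :: c2 :: t =>
      have hlt : List.length t ≤ fuel := by simp at h; omega
      have hlt2 : List.length (c2 :: t) ≤ fuel := by simp at h ⊢; omega
      by_cases hm : c = '%' ∧ c2 = x
      · obtain ⟨rfl, rfl⟩ := hm
        have hpre : ['%', c2].isPrefixOf ('%' :: c2 :: t) = true := by simp [List.isPrefixOf]
        rw [PySem.Chars.replace.go]
        simp only [hpre, if_true]
        rw [show List.drop (List.length ['%', c2]) ('%' :: c2 :: t) = t by simp]
        rw [ih t (new.reverse ++ acc) hlt, pvScanOne_pct_match]
        simp [List.append_assoc]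
      · have hpre : ['%', x].isPrefixOf (c :: c2 :: t) = false := by
          simp [List.isPrefixOf]
          intro hc hx2
          exact hm ⟨hc.symm, hx2.symm⟩
        rw [PySem.Chars.replace.go]
        simp only [hpre, Bool.false_eq_true, if_false]
        rw [ih (c2 :: t) (c :: acc) hlt2]
        by_cases hc : c = '%'
        · subst hc
          have h2 : c2 ≠ x := fun h2 => hm ⟨rfl, h2⟩
          rw [pvScanOne_pct x new _ (by simpa using h2)]
          simp
        · rw [pvScanOne_cons_ne x new hc]
          simp

lemma pvReplaceEq (x : Char) (new s : List Char) :
    PySem.Chars.replace s ['%', x] new = pvScanOne x new s := by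
  rw [PySem.Chars.replace]
  simp only [List.isEmpty_cons, if_false, Bool.false_eq_true]
  exact pvGoEq x new s.length s [] le_rfl

lemma pvBScan_eq (s : List Char) :
    pvBScan s = pvScanT (fun c => (pvLuaMap.get? c).map String.toList) s := by
  have : ∀ n s, List.length s ≤ n →
      pvBScan s = pvScanT (fun c => (pvLuaMap.get? c).map String.toList) s := by
    intro n
    induction n with
    | zero =>
      intro s h; have : s = [] := List.length_eq_zero_iff.mp (Nat.le_zero.mp h)
      subst this; rw [pvBScan_nil, pvScanT_nil]
    | succ n ih =>
      intro s h
      match s with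
      | [] => rw [pvBScan_nil, pvScanT_nil]
      | [c] => rw [pvScanT_singleton, pvBScan_singleton]
      | c :: c2 :: t =>
        have hlt : List.length t ≤ n := by simp at h; omega
        have hlt2 : List.length (c2 :: t) ≤ n := by simp at h ⊢; omega
        by_cases hc : c = '%'
        · subst hc
          cases hg : pvLuaMap.get? c2 with
          | some r =>
            rw [pvScanT_pct_some _ (show ((pvLuaMap.get? c2).map String.toList) = some r.toList by rw [hg]; rfl)]
            rw [pvBScan.eq_def]
            simp only [hg, if_true]
            rw [ih t hlt]
          | none =>
            rw [pvScanT_pct_none _ (show ((pvLuaMap.get? c2).map String.toList) = none by rw [hg]; rfl)]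
            rw [pvBScan.eq_def]
            simp only [hg, if_true]
            rw [ih (c2 :: t) hlt2]
        · rw [pvScanT_cons_ne _ hc, ← ih (c2 :: t) hlt2]
          rw [pvBScan.eq_def]; simp [hc]
  exact this s.length s le_rfl

-- the full seven-entry table equals B's dict lookup, pointwise
lemma pvTableEq (c : Char) :
    pvF [('p', "[^\\w\\s]".toList), ('s', "\\s".toList), ('u', "[A-Z]".toList),
         ('l', "[a-z]".toList), ('a', "[a-zA-Z]".toList), ('d', "\\d".toList),
         ('w', "\\w".toList)] c = (pvLuaMap.get? c).map String.toList := by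
  by_cases h1 : c = 'w'; · subst h1; rfl
  by_cases h2 : c = 'd'; · subst h2; rfl
  by_cases h3 : c = 'a'; · subst h3; rfl
  by_cases h4 : c = 'l'; · subst h4; rfl
  by_cases h5 : c = 'u'; · subst h5; rfl
  by_cases h6 : c = 's'; · subst h6; rfl
  by_cases h7 : c = 'p'; · subst h7; rfl
  have e1 : (('w' : Char) == c) = false := beq_eq_false_iff_ne.mpr (Ne.symm h1)
  have e2 : (('d' : Char) == c) = false := beq_eq_false_iff_ne.mpr (Ne.symm h2)
  have e3 : (('a' : Char) == c) = false := beq_eq_false_iff_ne.mpr (Ne.symm h3)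
  have e4 : (('l' : Char) == c) = false := beq_eq_false_iff_ne.mpr (Ne.symm h4)
  have e5 : (('u' : Char) == c) = false := beq_eq_false_iff_ne.mpr (Ne.symm h5)
  have e6 : (('s' : Char) == c) = false := beq_eq_false_iff_ne.mpr (Ne.symm h6)
  have e7 : (('p' : Char) == c) = false := beq_eq_false_iff_ne.mpr (Ne.symm h7)
  simp [pvF, pvLuaMap, PySem.Dict.get?, List.find?, e1, e2, e3, e4, e5, e6, e7]

lemma pvChainAll (u : List Char) :
    pvScanOne 'p' "[^\\w\\s]".toList (pvScanOne 's' "\\s".toList (pvScanOne 'u' "[A-Z]".toList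
      (pvScanOne 'l' "[a-z]".toList (pvScanOne 'a' "[a-zA-Z]".toList (pvScanOne 'd' "\\d".toList
        (pvScanOne 'w' "\\w".toList u)))))) =
    pvScanT (pvF [('p', "[^\\w\\s]".toList), ('s', "\\s".toList), ('u', "[A-Z]".toList),
      ('l', "[a-z]".toList), ('a', "[a-zA-Z]".toList), ('d', "\\d".toList), ('w', "\\w".toList)]) u := by
  conv_lhs => rw [← pvScanT_nil_f u]
  rw [pvFuseF [] 'w' _ (by decide) (by decide) (by decide) (by decide) u,
    pvFuseF _ 'd' _ (by decide) (by decide) (by decide) (by decide) u,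
    pvFuseF _ 'a' _ (by decide) (by decide) (by decide) (by decide) u,
    pvFuseF _ 'l' _ (by decide) (by decide) (by decide) (by decide) u,
    pvFuseF _ 'u' _ (by decide) (by decide) (by decide) (by decide) u,
    pvFuseF _ 's' _ (by decide) (by decide) (by decide) (by decide) u,
    pvFuseF _ 'p' _ (by decide) (by decide) (by decide) (by decide) u]

-- ===== VERDICT (by name: the statement is the Claim_ definition above) =====
theorem lua_pattern_to_regex_spec : Claim_equal_lua_pattern_to_regex := by
  unfold Claim_equal_lua_pattern_to_regex
  intro s _
  unfold Spec_lua_pattern_to_regex lua_pattern_to_regex lua_pattern_to_regex_alt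
  simp only [List.foldl]
  have key : (PySem.Str.replace (PySem.Str.replace (PySem.Str.replace (PySem.Str.replace
      (PySem.Str.replace (PySem.Str.replace (PySem.Str.replace s "%w" "\\w") "%d" "\\d")
        "%a" "[a-zA-Z]") "%l" "[a-z]") "%u" "[A-Z]") "%s" "\\s") "%p" "[^\\w\\s]").toList =
      pvBScan s.toList := by
    simp only [PySem.Str.toList_replace]
    rw [show ("%w" : String).toList = ['%', 'w'] from rfl,
      show ("%d" : String).toList = ['%', 'd'] from rfl,
      show ("%a" : String).toList = ['%', 'a'] from rfl,
      show ("%l" : String).toList = ['%', 'l'] from rfl,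
      show ("%u" : String).toList = ['%', 'u'] from rfl,
      show ("%s" : String).toList = ['%', 's'] from rfl,
      show ("%p" : String).toList = ['%', 'p'] from rfl,
      pvReplaceEq, pvReplaceEq, pvReplaceEq, pvReplaceEq, pvReplaceEq, pvReplaceEq, pvReplaceEq,
      pvChainAll, pvBScan_eq]
    exact pvScanT_congr _ _ pvTableEq s.toList
  have := congrArg String.ofList key
  rwa [String.ofList_toList] at this
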